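-- pv_equiv track=rewrite | github.com/Xabartshik/CybSec | lab8.py | decode_hamming
-- ===== SOURCE A (Python) =====
-- def get_parity_bit_positions(n):
--     """
--     Возвращает позиции контрольных битов (степени двойки).
--     """
--     positions = []
--     i = 0
--     while 2 ** i <= n:
--         positions.append(2 ** i)
--         i += 1
--     return positions
--
-- def decode_hamming(received, n, k):
--     """
--     Декодирует и исправляет ошибки в сообщении, закодированном кодом Хэмминга.
--     Возвращает (corrected_message, error_position).
--     """
--     received = [0] + received  # Добавляем нулевой индекс для удобства
--
--     # Вычисляем синдром
--     syndrome = 0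
--     parity_positions = get_parity_bit_positions(n)
--
--     for parity_pos in parity_positions:
--         parity = 0
--         for i in range(1, n + 1):
--             if i & parity_pos:
--                 parity ^= received[i]
--         if parity != 0:
--             syndrome += parity_pos
--
--     # Если синдром не равен 0, исправляем ошибку
--     if syndrome != 0:
--         received[syndrome] ^= 1  # Инвертируем ошибочный бит
--         error_position = syndrome
--     else:
--         error_position = 0
--
--     # Извлекаем информационные биты
--     parity_positions_set = set(parity_positions)
--     data_bits = []
--     for i in range(1, n + 1):
--         if i not in parity_positions_set:
--             data_bits.append(received[i])
--
--     return data_bits, error_position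
-- ===== SOURCE B (Python) =====
-- def decode_hamming(received, n, k):
--     """
--     Tournament/butterfly reduction: each level XORs adjacent pairs to halve
--     the message, yielding one syndrome bit per level, O(n) XORs in total
--     instead of one full scan per parity position.
--     """
--     cur = received[:n]
--     m = n
--     syndrome = 0
--     bit = 1
--     while m > 0:
--         half = m // 2
--         v0 = 0
--         nxt = []
--         for j in range(1, half + 1):
--             v0 ^= cur[2 * j - 2]
--             nxt.append(cur[2 * j - 1] ^ (cur[2 * j] if 2 * j + 1 <= m else 0))
--         if m % 2 == 1:
--             v0 ^= cur[m - 1]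
--         if v0 != 0:
--             syndrome += bit
--         cur = nxt
--         m = half
--         bit *= 2
--     data = []
--     for i in range(1, n + 1):
--         if i & (i - 1):
--             b = received[i - 1]
--             data.append(b ^ 1 if i == syndrome else b)
--     return data, syndrome
-- ===== Notes on version B (the rewrite author's own statement) =====
-- stated objective: faster
-- what changed: B replaces A's one-full-scan-per-parity-position syndrome computation by a tournament/butterfly reduction - each level XORs adjacent pairs to halve the message and yields one syndrome bit, O(n) XORs in total - and extracts the data bits directly with the i & (i-1) power-of-two test, flipping the erroneous bit inline instead of patching the list.
import Mathlib
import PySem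

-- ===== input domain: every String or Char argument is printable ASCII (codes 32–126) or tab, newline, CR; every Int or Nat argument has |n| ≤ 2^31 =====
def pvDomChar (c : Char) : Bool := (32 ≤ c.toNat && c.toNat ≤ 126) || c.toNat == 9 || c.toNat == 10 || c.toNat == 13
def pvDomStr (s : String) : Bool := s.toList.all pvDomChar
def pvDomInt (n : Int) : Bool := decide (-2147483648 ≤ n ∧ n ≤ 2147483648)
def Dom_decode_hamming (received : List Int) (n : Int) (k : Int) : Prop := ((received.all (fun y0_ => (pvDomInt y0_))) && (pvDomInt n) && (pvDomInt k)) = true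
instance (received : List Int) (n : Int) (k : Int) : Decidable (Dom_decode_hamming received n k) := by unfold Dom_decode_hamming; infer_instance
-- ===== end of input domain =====

-- B computes the syndrome by a tournament/butterfly reduction (each level XORs adjacent pairs
-- to halve the message and yields one syndrome bit, O(n) XORs in total) instead of A's full
-- scan per parity position, and flips the erroneous data bit inline (objective: faster).

-- ===== PORT A =====
-- while loop of get_parity_bit_positions, with enough fuel (the loop runs at most n times)
def pvGpbGo (n : Int) (i : Nat) : Nat → List Int
  | 0 => []
  | fuel + 1 => if (2:Int)^i ≤ n then (2:Int)^i :: pvGpbGo n (i+1) fuel else []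

def get_parity_bit_positions (n : Int) : List Int := pvGpbGo n 0 (n.toNat + 1)

def decode_hamming (received : List Int) (n : Int) (k : Int) : List Int × Int :=
  let rcv : List Int := 0 :: received
  let parity_positions := get_parity_bit_positions n
  let syndrome : Int := parity_positions.foldl (fun syn p =>
      let parity : Int := (PySem.List.pyRange 1 (n+1) 1).foldl
        (fun par i => if PySem.Int.band i p ≠ 0 then PySem.Int.bxor par (PySem.List.pyGetD rcv i 0) else par) 0
      if parity ≠ 0 then syn + p else syn) 0
  let rcv2 : List Int := if syndrome ≠ 0 then
      PySem.List.pySetD rcv syndrome (PySem.Int.bxor (PySem.List.pyGetD rcv syndrome 0) 1) else rcv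
  let error_position : Int := if syndrome ≠ 0 then syndrome else 0
  let pset : PySem.Set Int := PySem.Set.ofList parity_positions
  let data : List Int := (PySem.List.pyRange 1 (n+1) 1).foldl
      (fun acc i => if !(PySem.Set.contains pset i) then acc ++ [PySem.List.pyGetD rcv2 i 0] else acc) []
  (data, error_position)

-- ===== PORT B =====
-- the 'while m > 0' loop of Source B: one level of the butterfly per call
def pvBLoop (cur : List Int) (m : Int) (syndrome bit : Int) : Int :=
  if h : 0 < m then
    let half : Int := PySem.Int.floordiv m 2
    let vn : Int × List Int := (PySem.List.pyRange 1 (half+1) 1).foldl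
      (fun p j =>
        (PySem.Int.bxor p.1 (PySem.List.pyGetD cur (2*j - 2) 0),
         p.2 ++ [PySem.Int.bxor (PySem.List.pyGetD cur (2*j - 1) 0)
                   (if 2*j + 1 ≤ m then PySem.List.pyGetD cur (2*j) 0 else 0)]))
      (0, [])
    let v0 : Int := if PySem.Int.mod m 2 = 1 then PySem.Int.bxor vn.1 (PySem.List.pyGetD cur (m-1) 0) else vn.1
    let syndrome' : Int := if v0 ≠ 0 then syndrome + bit else syndrome
    pvBLoop vn.2 half syndrome' (bit * 2)
  else syndrome
termination_by m.toNat
decreasing_by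
  have h2 : PySem.Int.floordiv m 2 = m / 2 := PySem.Int.floordiv_eq_ediv_of_pos (by omega)
  rw [h2]; omega

def decode_hamming_alt (received : List Int) (n : Int) (k : Int) : List Int × Int :=
  let cur : List Int := PySem.List.slice received none (some n)
  let syndrome : Int := pvBLoop cur n 0 1
  let data : List Int := (PySem.List.pyRange 1 (n+1) 1).foldl (fun d i =>
      if PySem.Int.band i (i-1) ≠ 0 then
        let b := PySem.List.pyGetD received (i-1) 0
        d ++ [if i = syndrome then PySem.Int.bxor b 1 else b]
      else d) []
  (data, syndrome)

-- ===== PRECONDITION & SPEC =====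
-- number of parity positions / syndrome bits of an n-bit message
def pvNB (n : Int) : Nat := if 0 < n then PySem.Int.bitLength n else 0

-- XOR of g(kk) over kk < m restricted to indices i = 1+kk whose bit b is set (parity check b)
def pvSN (g : Nat → Int) (m b : Nat) : Int :=
  (List.range m).foldl (fun a kk => if Nat.testBit (1+kk) b then PySem.Int.bxor a (g kk) else a) 0

-- the Hamming error syndrome of the message, characterised arithmetically (used by neither port)
def pvSyn (received : List Int) (n : Int) : Int :=
  ((List.range (pvNB n)).map (fun b =>
    if pvSN (fun kk => received.getD kk 0) n.toNat b ≠ 0 then (2:Int)^b else 0)).sum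

-- A raises IndexError exactly when n > len(received) (reading the message) or when the computed
-- error syndrome exceeds len(received) (the correction step received[syndrome]); Pre_ excludes
-- exactly those raising inputs and nothing else.
def Pre_decode_hamming (received : List Int) (n : Int) (k : Int) : Prop :=
  n ≤ (received.length : Int) ∧ pvSyn received n ≤ (received.length : Int)
instance (received : List Int) (n : Int) (k : Int) : Decidable (Pre_decode_hamming received n k) := by
  unfold Pre_decode_hamming; infer_instance

def pvWitness_decode_hamming : List Int × Int × Int := ([1, 1, 0, 1, 0, 0, 1], 7, 4)

def Spec_decode_hamming (received : List Int) (n : Int) (k : Int) (out : List Int × Int) : Prop := out = decode_hamming_alt received n k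
instance (received : List Int) (n : Int) (k : Int) (out : List Int × Int) : Decidable (Spec_decode_hamming received n k out) := by unfold Spec_decode_hamming; infer_instance

-- ===== CLAIM (what is proved, stated in full; the proofs are below) =====
def Claim_equal_decode_hamming : Prop := ∀ (received : List Int) (n : Int) (k : Int), Dom_decode_hamming received n k → Pre_decode_hamming received n k → Spec_decode_hamming received n k (decode_hamming received n k)

-- ===== LEMMAS AND PROOFS =====

-- ---- generic bit/xor facts ----

theorem pv_bxor_assoc (a b c : Int) :
    PySem.Int.bxor (PySem.Int.bxor a b) c = PySem.Int.bxor a (PySem.Int.bxor b c) := by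
  have htn : ∀ j : Nat, (-(j:Int) - 1).toNat = 0 := by intro j; omega
  have hneg : ∀ j : Nat, ¬ (0 ≤ -(j:Int) - 1) := by intro j; omega
  have hmag : ∀ j : Nat, (-(-(j:Int) - 1) - 1).toNat = j := by intro j; omega
  unfold PySem.Int.bxor
  by_cases ha : 0 ≤ a <;> by_cases hb : 0 ≤ b <;> by_cases hc : 0 ≤ c <;>
    simp only [ha, hb, hc, if_true, if_false, Int.natCast_nonneg, Int.toNat_natCast,
      hneg, hmag, if_pos, if_neg] <;>
    rw [Nat.xor_assoc]

theorem pv_testbit_one_succ (b : Nat) : Nat.testBit 1 (b+1) = false := by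
  rw [Nat.testBit_add_one]
  simp

-- ---- A-side: the parity-position list and A's syndrome ----

theorem pv_pow_le_iff (n : Int) (hn : 0 < n) (i : Nat) : (2:Int)^i ≤ n ↔ i < pvNB n := by
  have h1 : n.natAbs < 2 ^ PySem.Int.bitLength n := PySem.Int.lt_two_pow_bitLength n
  have h2 : 2 ^ (PySem.Int.bitLength n - 1) ≤ n.natAbs :=
    PySem.Int.two_pow_bitLength_le n (by omega)
  have hbl : 1 ≤ PySem.Int.bitLength n := by
    by_contra hb
    have : PySem.Int.bitLength n = 0 := by omega
    rw [this] at h1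
    omega
  have hcast : ((n.natAbs : Int)) = n := Int.natAbs_of_nonneg hn.le
  have hiff : (2:Int)^i ≤ n ↔ 2^i ≤ n.natAbs := by
    rw [← hcast]
    exact_mod_cast Iff.rfl
  unfold pvNB
  rw [if_pos hn, hiff]
  constructor
  · intro h
    by_contra hge
    have hle : PySem.Int.bitLength n ≤ i := by omega
    have := Nat.pow_le_pow_right (by omega : 1 ≤ 2) hle
    omega
  · intro h
    have hle : i ≤ PySem.Int.bitLength n - 1 := by omega
    have := Nat.pow_le_pow_right (by omega : 1 ≤ 2) hle
    omega

theorem pv_gpb_go (n : Int) (i fuel : Nat) (h : pvNB n ≤ i + fuel) :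
    pvGpbGo n i fuel = (List.range (pvNB n - i)).map (fun j => (2:Int)^(i+j)) := by
  induction fuel generalizing i with
  | zero =>
    have h0 : pvNB n - i = 0 := by omega
    simp [pvGpbGo, h0]
  | succ fuel ih =>
    by_cases hn : 0 < n
    · by_cases hi : i < pvNB n
      · have hcond : (2:Int)^i ≤ n := (pv_pow_le_iff n hn i).mpr hi
        simp only [pvGpbGo, if_pos hcond]
        rw [ih (i+1) (by omega)]
        have h2 : pvNB n - i = (pvNB n - (i+1)) + 1 := by omega
        rw [h2, List.range_succ_eq_map]
        simp only [List.map_cons, List.map_map, Nat.add_zero, List.cons.injEq]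
        refine ⟨trivial, List.map_congr_left (fun j _ => ?_)⟩
        simp only [Function.comp]
        congr 1
        omega
      · have hcond : ¬ (2:Int)^i ≤ n := fun hc => hi ((pv_pow_le_iff n hn i).mp hc)
        have h0 : pvNB n - i = 0 := by omega
        simp [pvGpbGo, if_neg hcond, h0]
    · have hpow : (0:Int) < 2^i := by positivity
      have hcond : ¬ (2:Int)^i ≤ n := by omega
      have h0 : pvNB n = 0 := by unfold pvNB; rw [if_neg hn]
      simp [pvGpbGo, if_neg hcond, h0]

theorem pv_positions (n : Int) :
    get_parity_bit_positions n = (List.range (pvNB n)).map (fun b => (2:Int)^b) := by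
  unfold get_parity_bit_positions
  rw [pv_gpb_go n 0 (n.toNat + 1) ?_]
  · simp
  · by_cases hn : 0 < n
    · have h2 : 2 ^ (PySem.Int.bitLength n - 1) ≤ n.natAbs :=
        PySem.Int.two_pow_bitLength_le n (by omega)
      have h3 : PySem.Int.bitLength n - 1 < 2 ^ (PySem.Int.bitLength n - 1) :=
        Nat.lt_two_pow_self
      have h4 : pvNB n = PySem.Int.bitLength n := by unfold pvNB; rw [if_pos hn]
      omega
    · have h0 : pvNB n = 0 := by unfold pvNB; rw [if_neg hn]
      omega

theorem pv_cond_pow (i : Int) (hi : 0 ≤ i) (b : Nat) :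
    (PySem.Int.band i ((2:Int)^b) ≠ 0) ↔ Nat.testBit i.toNat b := by
  obtain ⟨m, rfl⟩ : ∃ m : Nat, i = (m : Int) := ⟨i.toNat, (Int.toNat_of_nonneg hi).symm⟩
  have h2 : ((2:Int)^b) = ((2^b : Nat) : Int) := by push_cast; rfl
  rw [h2, PySem.Int.band_natCast, Int.toNat_natCast, Nat.and_two_pow]
  rcases hb : Nat.testBit m b with _ | _ <;> simp [hb]

theorem pv_parityA (received : List Int) (n : Int) (b : Nat) :
    (PySem.List.pyRange 1 (n+1) 1).foldl
      (fun par i => if PySem.Int.band i ((2:Int)^b) ≠ 0 then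
          PySem.Int.bxor par (PySem.List.pyGetD (0 :: received) i 0) else par) 0
    = pvSN (fun kk => received.getD kk 0) n.toNat b := by
  rw [PySem.List.pyRange_one, add_sub_cancel_right, List.foldl_map]
  unfold pvSN
  apply PySem.List.foldl_congr_mem
  intro acc kk hkk
  have hnn : (0:Int) ≤ 1 + (kk:Int) := by positivity
  have ht : ((1:Int) + (kk:Int)).toNat = 1 + kk := by omega
  have hcond : (PySem.Int.band (1 + (kk:Int)) ((2:Int)^b) ≠ 0) ↔ Nat.testBit (1 + kk) b := by
    rw [pv_cond_pow _ hnn b, ht]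
  have h1 : ((1:Int) + (kk:Int)) = ((kk + 1 : Nat) : Int) := by push_cast; ring
  have hget : PySem.List.pyGetD (0 :: received) (1 + (kk:Int)) 0 = received.getD kk 0 := by
    rw [h1, PySem.List.pyGetD_natCast, List.getD_cons_succ]
  simp only [hcond, hget]

theorem pv_syndromeA (received : List Int) (n : Int) :
    (get_parity_bit_positions n).foldl (fun syn p =>
      let parity : Int := (PySem.List.pyRange 1 (n+1) 1).foldl
        (fun par i => if PySem.Int.band i p ≠ 0 then PySem.Int.bxor par (PySem.List.pyGetD (0 :: received) i 0) else par) 0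
      if parity ≠ 0 then syn + p else syn) 0 = pvSyn received n := by
  rw [pv_positions n, List.foldl_map]
  rw [PySem.List.foldl_congr_mem (List.range (pvNB n)) _
    (fun syn b => syn + if pvSN (fun kk => received.getD kk 0) n.toNat b ≠ 0 then (2:Int)^b else 0) 0 ?_]
  · rw [PySem.List.foldl_add, zero_add]
    rfl
  · intro syn b hb
    simp only [pv_parityA received n b]
    split_ifs <;> simp

-- ---- B-side: the butterfly reduction ----

-- value of the j-th pair at one butterfly level over an m-element message
def pvPairF (g : Nat → Int) (m : Nat) (jj : Nat) : Int :=
  PySem.Int.bxor (g (2*jj+1)) (if 2*jj+3 ≤ m then g (2*jj+2) else 0)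

-- XOR of g over even offsets 0, 2, …, 2(t-1)
def pvEvenX (g : Nat → Int) (t : Nat) : Int :=
  (List.range t).foldl (fun a jj => PySem.Int.bxor a (g (2*jj))) 0

theorem pv_sn_succ (g : Nat → Int) (m b : Nat) :
    pvSN g (m+1) b =
      if Nat.testBit (1+m) b then PySem.Int.bxor (pvSN g m b) (g m) else pvSN g m b := by
  unfold pvSN
  rw [List.range_succ, List.foldl_append, List.foldl_cons, List.foldl_nil]

theorem pv_evenx_succ (g : Nat → Int) (t : Nat) :
    pvEvenX g (t+1) = PySem.Int.bxor (pvEvenX g t) (g (2*t)) := by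
  unfold pvEvenX
  rw [List.range_succ, List.foldl_append, List.foldl_cons, List.foldl_nil]

theorem pv_sn_congr (g g' : Nat → Int) (m b : Nat) (h : ∀ kk, kk < m → g kk = g' kk) :
    pvSN g m b = pvSN g' m b := by
  unfold pvSN
  apply PySem.List.foldl_congr_mem
  intro acc kk hkk
  rw [h kk (List.mem_range.mp hkk)]

theorem pv_sn_zero (g : Nat → Int) (m : Nat) :
    pvSN g m 0 =
      if m % 2 = 1 then PySem.Int.bxor (pvEvenX g (m/2)) (g (m-1)) else pvEvenX g (m/2) := by
  induction m with
  | zero => simp [pvSN, pvEvenX]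
  | succ m ih =>
    rw [pv_sn_succ, ih, Nat.testBit_zero]
    rcases Nat.even_or_odd m with he | ho
    · obtain ⟨t, rfl⟩ := he
      have e1 : (t + t) % 2 = 0 := by omega
      have e2 : (1 + (t + t)) % 2 = 1 := by omega
      have e3 : (t + t + 1) % 2 = 1 := by omega
      have e4 : (t + t + 1) / 2 = t := by omega
      have e5 : (t + t) / 2 = t := by omega
      rw [e1, e2, e3, e4, e5]
      simp
    · obtain ⟨t, rfl⟩ := ho
      have e1 : (2*t + 1) % 2 = 1 := by omega
      have e2 : (1 + (2*t + 1)) % 2 = 0 := by omega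
      have e3 : (2*t + 1 + 1) % 2 = 0 := by omega
      have e4 : (2*t + 1 + 1) / 2 = t + 1 := by omega
      have e5 : (2*t + 1) / 2 = t := by omega
      rw [e1, e2, e3, e4, e5, pv_evenx_succ]
      simp

-- the key butterfly step: parity check b+1 over an m-element message equals parity check b
-- over the ⌊m/2⌋ pairwise-XORed values
theorem pv_butter (m : Nat) : ∀ (g : Nat → Int) (b : Nat),
    pvSN g m (b+1) = pvSN (pvPairF g m) (m/2) b := by
  induction m using Nat.strong_induction_on with
  | _ m ih =>
    intro g b
    match m with
    | 0 => simp [pvSN]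
    | 1 =>
      have h1 : Nat.testBit 1 (b+1) = false := pv_testbit_one_succ b
      simp [pvSN, h1]
    | (m' + 2) =>
      rcases Nat.even_or_odd m' with he | ho
      · -- m = 2t + 2
        obtain ⟨t, rfl⟩ := he
        have hm : t + t + 2 = (2*t + 1) + 1 := by omega
        rw [hm, pv_sn_succ]
        have hc1 : Nat.testBit (1 + (2*t+1)) (b+1) = Nat.testBit (t+1) b := by
          have h1 : 1 + (2*t+1) = 2*t+2 := by omega
          have h2 : (2*t+2) / 2 = t+1 := by omega
          rw [h1, Nat.testBit_add_one, h2]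
        have hih : pvSN g (2*t+1) (b+1) = pvSN (pvPairF g (2*t+1)) t b := by
          have := ih (2*t+1) (by omega) g b
          have hq : (2*t+1) / 2 = t := by omega
          rwa [hq] at this
        rw [hc1, hih]
        have hd : ((2*t+1) + 1) / 2 = t + 1 := by omega
        rw [hd]
        conv_rhs => rw [pv_sn_succ]
        have hc2 : Nat.testBit (1+t) b = Nat.testBit (t+1) b := by rw [Nat.add_comm]
        have hcongr : pvSN (pvPairF g ((2*t+1)+1)) t b = pvSN (pvPairF g (2*t+1)) t b := by
          apply pv_sn_congr
          intro kk hkk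
          unfold pvPairF
          rw [if_pos (by omega), if_pos (by omega)]
        have hlast : pvPairF g ((2*t+1)+1) t = g (2*t+1) := by
          unfold pvPairF
          rw [if_neg (by omega)]
          simp
        rw [hc2, hcongr, hlast]
      · -- m = 2t + 3
        obtain ⟨t, rfl⟩ := ho
        have hm : 2*t + 1 + 2 = ((2*t+1) + 1) + 1 := by omega
        rw [hm, pv_sn_succ, pv_sn_succ]
        have hc1 : Nat.testBit (1 + ((2*t+1)+1)) (b+1) = Nat.testBit (t+1) b := by
          have h1 : 1 + ((2*t+1)+1) = 2*t+3 := by omega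
          have h2 : (2*t+3) / 2 = t+1 := by omega
          rw [h1, Nat.testBit_add_one, h2]
        have hc2 : Nat.testBit (1 + (2*t+1)) (b+1) = Nat.testBit (t+1) b := by
          have h1 : 1 + (2*t+1) = 2*t+2 := by omega
          have h2 : (2*t+2) / 2 = t+1 := by omega
          rw [h1, Nat.testBit_add_one, h2]
        have hih : pvSN g (2*t+1) (b+1) = pvSN (pvPairF g (2*t+1)) t b := by
          have := ih (2*t+1) (by omega) g b
          have hq : (2*t+1) / 2 = t := by omega
          rwa [hq] at this
        rw [hc1, hc2, hih]
        have hd : (((2*t+1)+1)+1) / 2 = t + 1 := by omega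
        rw [hd]
        conv_rhs => rw [pv_sn_succ]
        have hc3 : Nat.testBit (1+t) b = Nat.testBit (t+1) b := by rw [Nat.add_comm]
        have hcongr : pvSN (pvPairF g (((2*t+1)+1)+1)) t b = pvSN (pvPairF g (2*t+1)) t b := by
          apply pv_sn_congr
          intro kk hkk
          unfold pvPairF
          rw [if_pos (by omega), if_pos (by omega)]
        have hlast : pvPairF g (((2*t+1)+1)+1) t = PySem.Int.bxor (g (2*t+1)) (g (2*t+2)) := by
          unfold pvPairF
          rw [if_pos (by omega)]
        rw [hc3, hcongr, hlast]
        rcases htb : Nat.testBit (t+1) b with _ | _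
        · simp
        · simp only [if_true]
          rw [pv_bxor_assoc]

-- ---- bit-length bookkeeping ----

theorem pv_size_step (m : Nat) (h : 0 < m) : Nat.size m = Nat.size (m/2) + 1 := by
  apply le_antisymm
  · apply Nat.size_le.mpr
    have h1 : m/2 < 2 ^ Nat.size (m/2) := Nat.size_le.mp (le_refl _)
    have h2 : 2 ^ (Nat.size (m/2) + 1) = 2 * 2 ^ Nat.size (m/2) := by ring
    omega
  · by_cases h0 : m / 2 = 0
    · have hm1 : m = 1 := by omega
      subst hm1
      simp [h0]
    · have hs : 0 < Nat.size (m/2) := Nat.size_pos.mpr (by omega)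
      obtain ⟨s', hs'⟩ : ∃ s', Nat.size (m/2) = s' + 1 := ⟨Nat.size (m/2) - 1, by omega⟩
      have h2 : 2 ^ s' ≤ m/2 := Nat.lt_size.mp (by omega)
      have h4 : 2 ^ (s'+1) ≤ m := by rw [pow_succ]; omega
      have h5 := Nat.lt_size.mpr h4
      omega

theorem pv_nb_size (n : Int) : pvNB n = Nat.size n.toNat := by
  by_cases hn : 0 < n
  · have h1 : n.natAbs < 2 ^ PySem.Int.bitLength n := PySem.Int.lt_two_pow_bitLength n
    have h2 : 2 ^ (PySem.Int.bitLength n - 1) ≤ n.natAbs :=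
      PySem.Int.two_pow_bitLength_le n (by omega)
    have hbl : 1 ≤ PySem.Int.bitLength n := by
      by_contra hb
      have : PySem.Int.bitLength n = 0 := by omega
      rw [this] at h1
      omega
    have hna : n.natAbs = n.toNat := by omega
    rw [hna] at h1 h2
    unfold pvNB
    rw [if_pos hn]
    apply le_antisymm
    · have := Nat.lt_size.mpr h2
      omega
    · exact Nat.size_le.mpr h1
  · have h0 : n.toNat = 0 := by omega
    unfold pvNB
    rw [if_neg hn, h0]
    simp

-- ---- the syndrome as a sum of syndrome bits, and its halving recurrence ----

def pvSSum (g : Nat → Int) (m : Nat) : Int :=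
  ((List.range (Nat.size m)).map (fun b => if pvSN g m b ≠ 0 then (2:Int)^b else 0)).sum

theorem pv_ssum_congr (g g' : Nat → Int) (m : Nat) (h : ∀ kk, kk < m → g kk = g' kk) :
    pvSSum g m = pvSSum g' m := by
  unfold pvSSum
  congr 1
  apply List.map_congr_left
  intro b _
  rw [pv_sn_congr g g' m b h]

theorem pv_ssum_step (g : Nat → Int) (m : Nat) (h : 0 < m) :
    pvSSum g m = (if pvSN g m 0 ≠ 0 then 1 else 0) + 2 * pvSSum (pvPairF g m) (m/2) := by
  unfold pvSSum
  rw [pv_size_step m h, List.range_succ_eq_map]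
  simp only [List.map_cons, List.sum_cons, List.map_map, pow_zero]
  congr 1
  rw [show ((fun b => if pvSN g m b ≠ 0 then (2:Int)^b else 0) ∘ Nat.succ)
      = fun b => if pvSN g m (b+1) ≠ 0 then (2:Int)^(b+1) else 0 from rfl]
  rw [List.map_congr_left (fun b _ => ?_), PySem.List.sum_map_const_mul_int]
  rw [pv_butter m g b]
  rcases hb : decide (pvSN (pvPairF g m) (m/2) b ≠ 0) with _ | _
  · simp only [decide_eq_false_iff_not, not_not] at hb
    simp [hb]
  · simp only [decide_eq_true_eq] at hb
    rw [if_pos hb, if_pos hb, pow_succ]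
    ring

theorem pv_syn_nonneg (received : List Int) (n : Int) : 0 ≤ pvSyn received n := by
  apply List.sum_nonneg
  intro x hx
  obtain ⟨b, _, rfl⟩ := List.mem_map.mp hx
  split_ifs
  · positivity
  · exact le_refl _

-- ---- the port of B's while loop computes pvSSum ----

theorem pv_bloop_aux (N : Nat) : ∀ (cur : List Int) (m syn bit : Int), m.toNat ≤ N →
    pvBLoop cur m syn bit = syn + bit * pvSSum (fun kk => cur.getD kk 0) m.toNat := by
  induction N with
  | zero =>
    intro cur m syn bit hN
    have hm : ¬ 0 < m := by omega
    rw [pvBLoop, dif_neg hm]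
    have h0 : m.toNat = 0 := by omega
    simp [h0, pvSSum]
  | succ N ih =>
    intro cur m syn bit hN
    by_cases hm : 0 < m
    · have hfd : PySem.Int.floordiv m 2 = m / 2 := PySem.Int.floordiv_eq_ediv_of_pos (by omega)
      have hmd : PySem.Int.mod m 2 = m % 2 := PySem.Int.mod_eq_emod_of_pos (by omega)
      have htn : (PySem.Int.floordiv m 2).toNat = m.toNat / 2 := by rw [hfd]; omega
      have hbound : (PySem.Int.floordiv m 2).toNat ≤ N := by rw [htn]; omega
      rw [pvBLoop, dif_pos hm]
      -- zeta-expand the locals of the loop body (definitional)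
      show pvBLoop
          ((PySem.List.pyRange 1 (PySem.Int.floordiv m 2 + 1) 1).foldl
            (fun p j =>
              (PySem.Int.bxor p.1 (PySem.List.pyGetD cur (2*j - 2) 0),
               p.2 ++ [PySem.Int.bxor (PySem.List.pyGetD cur (2*j - 1) 0)
                         (if 2*j + 1 ≤ m then PySem.List.pyGetD cur (2*j) 0 else 0)]))
            (0, [])).2
          (PySem.Int.floordiv m 2)
          (if (if PySem.Int.mod m 2 = 1 then
                PySem.Int.bxor
                  ((PySem.List.pyRange 1 (PySem.Int.floordiv m 2 + 1) 1).foldl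
                    (fun p j =>
                      (PySem.Int.bxor p.1 (PySem.List.pyGetD cur (2*j - 2) 0),
                       p.2 ++ [PySem.Int.bxor (PySem.List.pyGetD cur (2*j - 1) 0)
                                 (if 2*j + 1 ≤ m then PySem.List.pyGetD cur (2*j) 0 else 0)]))
                    (0, [])).1
                  (PySem.List.pyGetD cur (m-1) 0)
              else
                ((PySem.List.pyRange 1 (PySem.Int.floordiv m 2 + 1) 1).foldl
                  (fun p j =>
                    (PySem.Int.bxor p.1 (PySem.List.pyGetD cur (2*j - 2) 0),
                     p.2 ++ [PySem.Int.bxor (PySem.List.pyGetD cur (2*j - 1) 0)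
                               (if 2*j + 1 ≤ m then PySem.List.pyGetD cur (2*j) 0 else 0)]))
                  (0, [])).1) ≠ 0
            then syn + bit else syn)
          (bit * 2)
        = syn + bit * pvSSum (fun kk => cur.getD kk 0) m.toNat
      rw [PySem.List.foldl_prod_mk
        (f := fun (a : Int) (j : Int) => PySem.Int.bxor a (PySem.List.pyGetD cur (2*j - 2) 0))
        (g := fun (acc : List Int) (j : Int) =>
          acc ++ [PySem.Int.bxor (PySem.List.pyGetD cur (2*j - 1) 0)
            (if 2*j + 1 ≤ m then PySem.List.pyGetD cur (2*j) 0 else 0)])]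
      -- first accumulator: XOR of the even offsets
      have hF : (PySem.List.pyRange 1 (PySem.Int.floordiv m 2 + 1) 1).foldl
          (fun (a : Int) (j : Int) => PySem.Int.bxor a (PySem.List.pyGetD cur (2*j - 2) 0)) 0
          = pvEvenX (fun kk => cur.getD kk 0) (m.toNat/2) := by
        rw [PySem.List.pyRange_one, add_sub_cancel_right, htn, List.foldl_map]
        unfold pvEvenX
        apply PySem.List.foldl_congr_mem
        intro acc kk _
        have hcast : 2*(1 + (kk:Int)) - 2 = ((2*kk : Nat) : Int) := by push_cast; ring
        rw [hcast, PySem.List.pyGetD_natCast]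
      -- second accumulator: the list of pairwise XORs
      have hL : (PySem.List.pyRange 1 (PySem.Int.floordiv m 2 + 1) 1).foldl
          (fun (acc : List Int) (j : Int) =>
            acc ++ [PySem.Int.bxor (PySem.List.pyGetD cur (2*j - 1) 0)
              (if 2*j + 1 ≤ m then PySem.List.pyGetD cur (2*j) 0 else 0)]) []
          = (List.range (m.toNat/2)).map (pvPairF (fun kk => cur.getD kk 0) m.toNat) := by
        rw [PySem.List.pyRange_one, add_sub_cancel_right, htn,
          PySem.List.foldl_append_singleton_eq_map, List.nil_append, List.map_map]
        apply List.map_congr_left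
        intro kk hkk
        simp only [Function.comp]
        unfold pvPairF
        have hc1 : 2*(1 + (kk:Int)) - 1 = ((2*kk+1 : Nat) : Int) := by push_cast; ring
        have hc2 : 2*(1 + (kk:Int)) = ((2*kk+2 : Nat) : Int) := by push_cast; ring
        rw [hc1, PySem.List.pyGetD_natCast]
        congr 1
        by_cases hcond : 2*kk+3 ≤ m.toNat
        · rw [if_pos (show 2*(1 + (kk:Int)) + 1 ≤ m from by omega), if_pos hcond,
            hc2, PySem.List.pyGetD_natCast]
        · rw [if_neg (show ¬ (2*(1 + (kk:Int)) + 1 ≤ m) from by omega), if_neg hcond]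
      rw [hF, hL]
      simp only []
      -- the level's first syndrome bit
      have hgetm : PySem.List.pyGetD cur (m-1) 0 = cur.getD (m.toNat - 1) 0 := by
        rw [show m - 1 = ((m.toNat - 1 : Nat) : Int) from by omega, PySem.List.pyGetD_natCast]
      have hv0 : (if PySem.Int.mod m 2 = 1 then
            PySem.Int.bxor (pvEvenX (fun kk => cur.getD kk 0) (m.toNat/2)) (PySem.List.pyGetD cur (m-1) 0)
          else pvEvenX (fun kk => cur.getD kk 0) (m.toNat/2))
          = pvSN (fun kk => cur.getD kk 0) m.toNat 0 := by
        rw [pv_sn_zero]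
        by_cases hpar : m.toNat % 2 = 1
        · rw [if_pos (show PySem.Int.mod m 2 = 1 from by rw [hmd]; omega), if_pos hpar, hgetm]
        · rw [if_neg (show ¬ PySem.Int.mod m 2 = 1 from by rw [hmd]; omega), if_neg hpar]
      rw [hv0]
      -- recurse on the halved level
      rw [ih ((List.range (m.toNat/2)).map (pvPairF (fun kk => cur.getD kk 0) m.toNat))
        (PySem.Int.floordiv m 2)
        (if pvSN (fun kk => cur.getD kk 0) m.toNat 0 ≠ 0 then syn + bit else syn)
        (bit * 2) hbound]
      rw [htn]
      have hcg : pvSSum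
            (fun kk => ((List.range (m.toNat/2)).map (pvPairF (fun kk => cur.getD kk 0) m.toNat)).getD kk 0)
            (m.toNat/2)
          = pvSSum (pvPairF (fun kk => cur.getD kk 0) m.toNat) (m.toNat/2) := by
        apply pv_ssum_congr
        intro kk hkk
        exact PySem.List.getD_map_range (pvPairF (fun kk => cur.getD kk 0) m.toNat) (m.toNat/2) kk 0 hkk
      rw [hcg, pv_ssum_step (fun kk => cur.getD kk 0) m.toNat (by omega)]
      split_ifs <;> ring
    · rw [pvBLoop, dif_neg hm]
      have h0 : m.toNat = 0 := by omega
      simp [h0, pvSSum]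

theorem pv_syndromeB (received : List Int) (n : Int) :
    pvBLoop (PySem.List.slice received none (some n)) n 0 1 = pvSyn received n := by
  rw [pv_bloop_aux n.toNat _ n 0 1 (le_refl _), zero_add, one_mul]
  have hcg : pvSSum (fun kk => (PySem.List.slice received none (some n)).getD kk 0) n.toNat
      = pvSSum (fun kk => received.getD kk 0) n.toNat := by
    apply pv_ssum_congr
    intro kk hkk
    have hn0 : (0:Int) ≤ n := by omega
    rw [PySem.List.slice_to _ hn0]
    rw [List.getD_eq_getElem?_getD, List.getD_eq_getElem?_getD, List.getElem?_take,
      if_pos (by omega)]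
  rw [hcg]
  unfold pvSSum pvSyn
  rw [pv_nb_size]

-- ---- the data-bit extraction: membership in the parity-position set vs i & (i-1) ----

theorem pv_pow2_iff (m : Nat) (hm : 1 ≤ m) : (m &&& (m-1) = 0) ↔ ∃ b, m = 2^b := by
  constructor
  · intro h
    by_contra hne
    simp only [not_exists] at hne
    set b := Nat.log2 m with hb
    have h1 : 2^b ≤ m := Nat.log2_self_le (by omega)
    have h2 : m < 2^(b+1) := Nat.lt_log2_self
    have hgt : 2^b < m := lt_of_le_of_ne h1 (fun he => hne b he.symm)
    have hpow : 2^(b+1) = 2*2^b := by ring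
    have hd1 : m / 2^b = 1 := Nat.div_eq_of_lt_le (by omega) (by omega)
    have hd2 : (m-1) / 2^b = 1 := Nat.div_eq_of_lt_le (by omega) (by omega)
    have ht1 : Nat.testBit m b = true := by
      rw [Nat.testBit_eq_decide_div_mod_eq, hd1]
      decide
    have ht2 : Nat.testBit (m-1) b = true := by
      rw [Nat.testBit_eq_decide_div_mod_eq, hd2]
      decide
    have hand : (m &&& (m-1)).testBit b = true := by
      rw [Nat.testBit_and, ht1, ht2]
      rfl
    rw [h, Nat.zero_testBit] at hand
    exact Bool.false_ne_true hand
  · rintro ⟨b, rfl⟩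
    have h := Nat.and_two_pow_sub_one_eq_mod (2^b) b
    rw [h, Nat.mod_self]

theorem pv_cond_eq (n i : Int) (hn : 0 < n) (h1 : 1 ≤ i) (h2 : i ≤ n) :
    (!PySem.Set.contains (PySem.Set.ofList (get_parity_bit_positions n)) i)
      = decide (PySem.Int.band i (i-1) ≠ 0) := by
  have hml : i ∈ get_parity_bit_positions n ↔ (∃ b, b < pvNB n ∧ i = 2^b) := by
    rw [pv_positions n]
    simp [eq_comm]
  have hband : (PySem.Int.band i (i-1) = 0) ↔ (∃ b, b < pvNB n ∧ i = 2^b) := by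
    have hi0 : (0:Int) ≤ i := by omega
    have hi1 : (0:Int) ≤ i - 1 := by omega
    rw [PySem.Int.band_of_nonneg hi0 hi1]
    have htn : (i-1).toNat = i.toNat - 1 := by omega
    rw [htn, Int.natCast_eq_zero, pv_pow2_iff i.toNat (by omega)]
    constructor
    · rintro ⟨b, hb⟩
      have hcast : i = ((2^b : Nat) : Int) := by omega
      have hpow : ((2^b : Nat) : Int) = (2:Int)^b := by push_cast; rfl
      refine ⟨b, ?_, by rw [hcast, hpow]⟩
      apply (pv_pow_le_iff n hn b).mp
      rw [← hpow, ← hcast]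
      omega
    · rintro ⟨b, hbL, rfl⟩
      refine ⟨b, ?_⟩
      have hpow : ((2^b : Nat) : Int) = (2:Int)^b := by push_cast; rfl
      omega
  by_cases hc : PySem.Int.band i (i-1) = 0
  · have hm : i ∈ get_parity_bit_positions n := hml.mpr (hband.mp hc)
    simp [PySem.Set.contains, PySem.Set.mem_ofList, hm, hc]
  · have hm : i ∉ get_parity_bit_positions n := fun hmm => hc (hband.mpr (hml.mp hmm))
    simp [PySem.Set.contains, PySem.Set.mem_ofList, hm, hc]

theorem pv_getD_rcv2 (received : List Int) (S i : Int)
    (hS0 : 0 ≤ S) (hSlen : S ≤ (received.length : Int)) (hi : 1 ≤ i) (hilen : i ≤ (received.length : Int)) :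
    PySem.List.pyGetD (if S ≠ 0 then
        PySem.List.pySetD (0 :: received) S (PySem.Int.bxor (PySem.List.pyGetD (0 :: received) S 0) 1)
      else (0 :: received)) i 0
    = (if i = S then PySem.Int.bxor (PySem.List.pyGetD received (i-1) 0) 1
       else PySem.List.pyGetD received (i-1) 0) := by
  obtain ⟨a, rfl⟩ : ∃ a : Nat, i = (a:Int) := ⟨i.toNat, by omega⟩
  obtain ⟨sv, rfl⟩ : ∃ sv : Nat, S = (sv:Int) := ⟨S.toNat, by omega⟩
  have ha1 : 1 ≤ a := by omega
  have halen : a ≤ received.length := by omega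
  have hslen : sv ≤ received.length := by omega
  have hgetr : PySem.List.pyGetD received ((a:Int)-1) 0 = received.getD (a - 1) 0 := by
    have he : ((a:Int) - 1) = ((a - 1 : Nat) : Int) := by omega
    rw [he, PySem.List.pyGetD_natCast]
  have hgetc : ∀ (j : Nat), 1 ≤ j → PySem.List.pyGetD (0 :: received) (j:Int) 0 = received.getD (j - 1) 0 := by
    intro j hj
    rw [PySem.List.pyGetD_natCast]
    conv_lhs => rw [show j = (j-1)+1 by omega]
    rw [List.getD_cons_succ]
  by_cases hS : (sv:Int) = 0
  · rw [if_neg (by omega : ¬ (sv:Int) ≠ 0), if_neg (by omega : ¬ ((a:Int) = (sv:Int))), hgetc a ha1, hgetr]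
  · rw [if_pos hS, PySem.List.pySetD_of_nonneg _ _ (by positivity), hgetc sv (by omega)]
    simp only [Int.toNat_natCast]
    rw [PySem.List.pyGetD_natCast]
    by_cases hiS : a = sv
    · subst hiS
      rw [if_pos rfl, List.getD_eq_getElem _ _ (by simp; omega), List.getElem_set, if_pos rfl, hgetr]
    · have hcons : (0 :: received).getD a 0 = received.getD (a-1) 0 := by
        conv_lhs => rw [show a = (a-1)+1 by omega]
        rw [List.getD_cons_succ]
      rw [if_neg (by omega : ¬ ((a:Int) = (sv:Int))),
        List.getD_eq_getElem _ _ (by simp; omega), List.getElem_set, if_neg (fun hh => hiS hh.symm),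
        ← List.getD_eq_getElem (0 :: received) _ (by simp; omega), hcons, hgetr]

-- ===== VERDICT =====
theorem decode_hamming_spec : Claim_equal_decode_hamming := by
  intro received n k hdom hpre
  obtain ⟨hlen, hsyn⟩ := hpre
  unfold Spec_decode_hamming decode_hamming decode_hamming_alt
  simp only [pv_syndromeA, pv_syndromeB received n]
  set S := pvSyn received n with hSdef
  have hS0 : 0 ≤ S := pv_syn_nonneg received n
  rw [PySem.List.foldl_append_if, PySem.List.foldl_append_ite]
  simp only [Prod.mk.injEq, List.nil_append]
  refine ⟨?_, ?_⟩
  · rw [List.filter_congr (fun x hx => ?_)]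
    · apply List.map_congr_left
      intro x hx
      have hxl := List.mem_filter.mp hx
      have hxr := PySem.List.mem_pyRange_one.mp hxl.1
      exact pv_getD_rcv2 received S x hS0 hsyn (by omega) (by omega)
    · have hxr := PySem.List.mem_pyRange_one.mp hx
      exact pv_cond_eq n x (by omega) (by omega) (by omega)
  · split_ifs with h <;> omega
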